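-- pv_equiv track=rewrite | github.com/EvanSchalton/Tmux-Orchestrator | tmux_orchestrator/core/monitor_change_detection.py | detect_active_state_levenshtein
-- ===== SOURCE A (Python) =====
-- from typing import Any, Callable, List
--
-- def levenshtein_distance(s1: str, s2: str) -> int:
--     """Calculate the Levenshtein distance between two strings.
--
--     Args:
--         s1: First string
--         s2: Second string
--
--     Returns:
--         The minimum number of single-character edits (insertions, deletions, substitutions)
--         required to change s1 into s2
--     """
--     if len(s1) < len(s2):
--         return levenshtein_distance(s2, s1)
--
--     if len(s2) == 0:
--         return len(s1)
--
--     # Create distance matrix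
--     previous_row = list(range(len(s2) + 1))
--
--     for i, c1 in enumerate(s1):
--         current_row = [i + 1]
--         for j, c2 in enumerate(s2):
--             # j+1 instead of j since previous_row and current_row are one character longer than s2
--             insertions = previous_row[j + 1] + 1
--             deletions = current_row[j] + 1
--             substitutions = previous_row[j] + (c1 != c2)
--             current_row.append(min(insertions, deletions, substitutions))
--         previous_row = current_row
--
--     return previous_row[-1]
--
-- def detect_active_state_levenshtein(snapshots: List[str], threshold: int = 1) -> bool:
--     """Detect if terminal is actively changing using Levenshtein distance.
--
--     Based on planning/change-detection.md:
--     - Poll every 300ms for 1.2s (4 snapshots)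
--     - Calculate Levenshtein distance between successive polls
--     - If distance > threshold, terminal is actively thinking
--
--     Args:
--         snapshots: List of terminal snapshots taken at 300ms intervals
--         threshold: Minimum distance to consider as active (default: 1)
--
--     Returns:
--         True if terminal is actively changing, False otherwise
--     """
--     if len(snapshots) < 2:
--         return False
--
--     # Check for "Compacting conversation" indicator
--     for snapshot in snapshots:
--         if "Compacting conversation" in snapshot:
--             return True
--
--     # Calculate distances between successive snapshots
--     for i in range(1, len(snapshots)):
--         distance = levenshtein_distance(snapshots[i - 1], snapshots[i])
--         if distance > threshold:
--             return True
--
--     return False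
-- ===== SOURCE B (Python) =====
-- from typing import List
--
--
-- def _levenshtein_via_diagonals(s1: str, s2: str) -> int:
--     """Levenshtein distance computed by an anti-diagonal wavefront: the DP cells
--     are stored in a dict keyed by (i, j) and filled in order of increasing i+j,
--     so each diagonal only reads the two previous diagonals (and the borders)."""
--     n, m = len(s1), len(s2)
--     cells = {}
--
--     def cell(i: int, j: int) -> int:
--         if i == 0:
--             return j
--         if j == 0:
--             return i
--         return cells[(i, j)]
--
--     for k in range(2, n + m + 1):
--         for i in range(max(1, k - m), min(n, k - 1) + 1):
--             j = k - i
--             cost = 0 if s1[i - 1] == s2[j - 1] else 1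
--             cells[(i, j)] = min(cell(i - 1, j) + 1,
--                                 cell(i, j - 1) + 1,
--                                 cell(i - 1, j - 1) + cost)
--     return cell(n, m)
--
--
-- def detect_active_state_levenshtein(snapshots: List[str], threshold: int = 1) -> bool:
--     if len(snapshots) < 2:
--         return False
--     if any("Compacting conversation" in s for s in snapshots):
--         return True
--     return any(_levenshtein_via_diagonals(a, b) > threshold
--                for a, b in zip(snapshots, snapshots[1:]))
-- ===== Notes on version B (the rewrite author's own statement) =====
-- stated objective: alternative
-- what changed: B replaces A's row-by-row two-row Levenshtein DP (current_row rebuilt from previous_row for each character of the longer string, after swapping so s1 is longest) by an anti-diagonal wavefront: DP cells live in a dict keyed by (i, j) and are filled in order of increasing i + j, each diagonal reading only the two previous diagonals and the borders, with no string swap and no row lists; the pairing loop is a zip over consecutive snapshots instead of an index loop.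
import Mathlib
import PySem

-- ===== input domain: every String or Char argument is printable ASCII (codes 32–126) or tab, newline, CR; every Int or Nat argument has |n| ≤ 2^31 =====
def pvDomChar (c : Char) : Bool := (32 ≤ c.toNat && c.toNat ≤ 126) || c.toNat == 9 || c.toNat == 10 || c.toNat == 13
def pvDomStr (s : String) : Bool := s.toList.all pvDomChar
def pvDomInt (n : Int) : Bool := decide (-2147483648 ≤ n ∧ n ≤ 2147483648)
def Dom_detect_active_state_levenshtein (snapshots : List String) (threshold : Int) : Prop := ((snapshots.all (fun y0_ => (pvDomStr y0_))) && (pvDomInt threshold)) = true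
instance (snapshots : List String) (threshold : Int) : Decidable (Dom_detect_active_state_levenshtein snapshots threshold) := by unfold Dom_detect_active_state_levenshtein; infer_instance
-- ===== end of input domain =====

-- B replaces A's row-by-row two-row Levenshtein DP by an anti-diagonal wavefront that stores
-- DP cells in a dict keyed by (i, j) and fills them in order of increasing i + j
-- (alternative algorithmic organisation, same exact result; no speed claim).

-- ===== PORT A =====
-- inner loop of levenshtein_distance: builds current_row from previous_row (indices always in
-- range, so pyGetD's default 0 is never used)
def levRowA (c1 : Char) (i : Int) (prev : List Int) (s2 : List Char) : List Int :=
  (PySem.List.enumerate s2).foldl (fun cur jc =>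
    let insertions := PySem.List.pyGetD prev (jc.1 + 1) 0 + 1
    let deletions := PySem.List.pyGetD cur jc.1 0 + 1
    let substitutions := PySem.List.pyGetD prev jc.1 0 + (if c1 ≠ jc.2 then 1 else 0)
    cur ++ [min insertions (min deletions substitutions)]) [i + 1]

def levenshtein_distance (s1 s2 : String) : Int :=
  if PySem.Str.len s1 < PySem.Str.len s2 then
    levenshtein_distance s2 s1
  else if PySem.Str.len s2 = 0 then PySem.Str.len s1
  else
    let final := (PySem.List.enumerate s1.toList).foldl
      (fun prev ic => levRowA ic.2 ic.1 prev s2.toList)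
      (PySem.List.pyRange 0 (PySem.Str.len s2 + 1) 1)
    PySem.List.pyGetD final (-1) 0   -- previous_row[-1]; the row is never empty
termination_by s2.toList.length
decreasing_by
  rename_i h; simp only [PySem.Str.len_eq, Int.ofNat_lt] at h; omega

def detect_active_state_levenshtein (snapshots : List String) (threshold : Int) : Bool :=
  if snapshots.length < 2 then false
  else if snapshots.any (fun snapshot => PySem.Str.isIn "Compacting conversation" snapshot) then true
  else (PySem.List.pyRange 1 (snapshots.length : Int) 1).any (fun i =>
    decide (levenshtein_distance (PySem.List.pyGetD snapshots (i - 1) "")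
      (PySem.List.pyGetD snapshots i "") > threshold))

-- ===== PORT B =====
-- cell(i, j) of _levenshtein_via_diagonals: borders are computed, interior cells are read
-- from the dict (cells[(i, j)]: the key is always present when read, by the wavefront fill
-- order, so Python's KeyError is unreachable and getD's default 0 is never used)
def pvCell (cells : PySem.Dict (Int × Int) Int) (i j : Int) : Int :=
  if i = 0 then j
  else if j = 0 then i
  else cells.getD (i, j) 0

-- the two nested for-loops of _levenshtein_via_diagonals, sweeping anti-diagonals k = i + j
def pvLevDiag (s1 s2 : String) : Int :=
  let n := PySem.Str.len s1
  let m := PySem.Str.len s2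
  let cells := (PySem.List.pyRange 2 (n + m + 1) 1).foldl (fun cells k =>
    (PySem.List.pyRange (max 1 (k - m)) (min n (k - 1) + 1) 1).foldl (fun cells i =>
      let j := k - i
      let cost : Int := if PySem.Str.pyGet? s1 (i - 1) = PySem.Str.pyGet? s2 (j - 1) then 0 else 1
      cells.insert (i, j) (min (pvCell cells (i - 1) j + 1)
        (min (pvCell cells i (j - 1) + 1) (pvCell cells (i - 1) (j - 1) + cost)))) cells)
    PySem.Dict.empty
  pvCell cells n m

def detect_active_state_levenshtein_alt (snapshots : List String) (threshold : Int) : Bool :=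
  if snapshots.length < 2 then false
  else if snapshots.any (fun s => PySem.Str.isIn "Compacting conversation" s) then true
  else (snapshots.zip (snapshots.drop 1)).any (fun p => decide (pvLevDiag p.1 p.2 > threshold))

-- ===== PRECONDITION & SPEC =====
def Spec_detect_active_state_levenshtein (snapshots : List String) (threshold : Int) (out : Bool) : Prop := out = detect_active_state_levenshtein_alt snapshots threshold
instance (snapshots : List String) (threshold : Int) (out : Bool) : Decidable (Spec_detect_active_state_levenshtein snapshots threshold out) := by unfold Spec_detect_active_state_levenshtein; infer_instance

-- ===== CLAIM (what is proved, stated in full; the proofs are below) =====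
def Claim_equal_detect_active_state_levenshtein : Prop := ∀ (snapshots : List String) (threshold : Int), Dom_detect_active_state_levenshtein snapshots threshold → Spec_detect_active_state_levenshtein snapshots threshold (detect_active_state_levenshtein snapshots threshold)

-- ===== LEMMAS AND PROOFS =====

-- reference recurrence: dRec a b i j = Levenshtein DP value at cell (i, j) (prefix lengths)
def dRec (a b : List Char) : Nat → Nat → Int
  | 0, j => (j : Int)
  | i + 1, 0 => (i : Int) + 1
  | i + 1, j + 1 =>
      min (dRec a b i (j + 1) + 1)
        (min (dRec a b (i + 1) j + 1)
          (dRec a b i j + (if a[i]? = b[j]? then 0 else 1)))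
termination_by i j => i + j

theorem dRec_zero_left (a b : List Char) (j : Nat) : dRec a b 0 j = (j : Int) := by
  cases j <;> simp [dRec]

theorem dRec_zero_right (a b : List Char) (i : Nat) : dRec a b i 0 = (i : Int) := by
  cases i <;> simp [dRec]

theorem dRec_succ (a b : List Char) (i j : Nat) :
    dRec a b (i + 1) (j + 1) =
      min (dRec a b i (j + 1) + 1)
        (min (dRec a b (i + 1) j + 1)
          (dRec a b i j + (if a[i]? = b[j]? then 0 else 1))) := by
  simp [dRec]

theorem dRec_symm (a b : List Char) : ∀ N i j, i + j ≤ N → dRec a b i j = dRec b a j i := by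
  intro N
  induction N with
  | zero =>
    intro i j h
    have hi : i = 0 := by omega
    have hj : j = 0 := by omega
    subst hi; subst hj
    rw [dRec_zero_left, dRec_zero_right]
  | succ N ih =>
    intro i j h
    rcases i with _ | i
    · rw [dRec_zero_left, dRec_zero_right]
    · rcases j with _ | j
      · rw [dRec_zero_left, dRec_zero_right]
      · rw [dRec_succ, dRec_succ,
          ih i (j + 1) (by omega), ih (i + 1) j (by omega), ih i j (by omega)]
        have hc : (if a[i]? = b[j]? then (0 : Int) else 1)
            = (if b[j]? = a[i]? then (0 : Int) else 1) := by
          by_cases hcc : a[i]? = b[j]?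
          · rw [if_pos hcc, if_pos hcc.symm]
          · rw [if_neg hcc, if_neg (fun e => hcc e.symm)]
        rw [hc, min_left_comm]

-- ---------- A side: the row-by-row fold computes dRec ----------

theorem rowA_inner (a b : List Char) (i : Nat) (ca : Char) (ha : a[i]? = some ca) :
    ∀ (suf : List Char) (t : Nat), List.drop t b = suf → t ≤ b.length →
    (PySem.List.enumerate suf (t : Int)).foldl (fun cur jc =>
      cur ++ [min (PySem.List.pyGetD ((List.range (b.length + 1)).map (fun j => dRec a b i j)) (jc.1 + 1) 0 + 1)
        (min (PySem.List.pyGetD cur jc.1 0 + 1)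
          (PySem.List.pyGetD ((List.range (b.length + 1)).map (fun j => dRec a b i j)) jc.1 0
            + (if ca ≠ jc.2 then 1 else 0)))])
      ((List.range (t + 1)).map (fun j => dRec a b (i + 1) j))
    = (List.range (b.length + 1)).map (fun j => dRec a b (i + 1) j) := by
  intro suf
  induction suf with
  | nil =>
    intro t hdrop hle
    have ht : t = b.length := by
      have := List.drop_eq_nil_iff.mp hdrop
      omega
    subst ht
    rw [PySem.List.enumerate_nil, List.foldl_nil]
  | cons c rest ihsuf =>
    intro t hdrop hle
    have ht : t < b.length := by
      have := congrArg List.length hdrop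
      simp [List.length_drop] at this
      omega
    have hbt : b[t]? = some c := by
      have h0 := List.getElem?_drop (xs := b) (i := t) (j := 0)
      rw [hdrop] at h0
      simpa using h0.symm
    simp only [PySem.List.enumerate_cons, List.foldl_cons]
    have e1 : PySem.List.pyGetD ((List.range (b.length + 1)).map (fun j => dRec a b i j))
        ((t : Int) + 1) 0 = dRec a b i (t + 1) := by
      have hcast : ((t : Int) + 1) = (((t + 1 : Nat) : Int)) := by push_cast; ring
      rw [hcast, PySem.List.pyGetD_natCast, PySem.List.getD_map_range _ _ _ _ (by omega)]
    have e2 : PySem.List.pyGetD ((List.range (t + 1)).map (fun j => dRec a b (i + 1) j))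
        ((t : Int)) 0 = dRec a b (i + 1) t := by
      rw [PySem.List.pyGetD_natCast, PySem.List.getD_map_range _ _ _ _ (by omega)]
    have e3 : PySem.List.pyGetD ((List.range (b.length + 1)).map (fun j => dRec a b i j))
        ((t : Int)) 0 = dRec a b i t := by
      rw [PySem.List.pyGetD_natCast, PySem.List.getD_map_range _ _ _ _ (by omega)]
    have ecost : (if ca ≠ c then (1 : Int) else 0) = (if a[i]? = b[t]? then (0 : Int) else 1) := by
      rw [ha, hbt]
      by_cases hcc : ca = c
      · rw [if_neg (by simpa using hcc), if_pos (by simpa using hcc)]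
      · rw [if_pos (by simpa using hcc), if_neg (by simpa using hcc)]
    have hstep : ((List.range (t + 1)).map (fun j => dRec a b (i + 1) j)
        ++ [min (PySem.List.pyGetD ((List.range (b.length + 1)).map (fun j => dRec a b i j)) ((t : Int) + 1) 0 + 1)
          (min (PySem.List.pyGetD ((List.range (t + 1)).map (fun j => dRec a b (i + 1) j)) ((t : Int)) 0 + 1)
            (PySem.List.pyGetD ((List.range (b.length + 1)).map (fun j => dRec a b i j)) ((t : Int)) 0
              + (if ca ≠ c then 1 else 0)))])
        = (List.range (t + 1 + 1)).map (fun j => dRec a b (i + 1) j) := by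
      rw [e1, e2, e3, ecost, ← dRec_succ]
      simp [List.range_succ]
    have hdrop' : List.drop (t + 1) b = rest := by
      rw [← List.drop_drop, hdrop]
      rfl
    have hcast2 : ((t : Int) + 1) = (((t + 1 : Nat) : Int)) := by push_cast; ring
    rw [hstep, hcast2]
    exact ihsuf (t + 1) hdrop' (by omega)

theorem rowA (a b : List Char) (i : Nat) (ca : Char) (ha : a[i]? = some ca) :
    levRowA ca (i : Int) ((List.range (b.length + 1)).map (fun j => dRec a b i j)) b
    = (List.range (b.length + 1)).map (fun j => dRec a b (i + 1) j) := by
  have h := rowA_inner a b i ca ha b 0 rfl (by omega)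
  have hinit : ((List.range (0 + 1)).map (fun j => dRec a b (i + 1) j)) = [(i : Int) + 1] := by
    simp [dRec_zero_right]
  rw [hinit] at h
  simpa [levRowA] using h

theorem outerA (a b : List Char) :
    ∀ (suf : List Char) (t : Nat), List.drop t a = suf → t ≤ a.length →
    (PySem.List.enumerate suf (t : Int)).foldl (fun prev ic => levRowA ic.2 ic.1 prev b)
      ((List.range (b.length + 1)).map (fun j => dRec a b t j))
    = (List.range (b.length + 1)).map (fun j => dRec a b a.length j) := by
  intro suf
  induction suf with
  | nil =>
    intro t hdrop hle
    have ht : t = a.length := by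
      have := List.drop_eq_nil_iff.mp hdrop
      omega
    subst ht
    rw [PySem.List.enumerate_nil, List.foldl_nil]
  | cons c rest ihsuf =>
    intro t hdrop hle
    have ht : t < a.length := by
      have := congrArg List.length hdrop
      simp [List.length_drop] at this
      omega
    have hat : a[t]? = some c := by
      have h0 := List.getElem?_drop (xs := a) (i := t) (j := 0)
      rw [hdrop] at h0
      simpa using h0.symm
    simp only [PySem.List.enumerate_cons, List.foldl_cons]
    have hdrop' : List.drop (t + 1) a = rest := by
      rw [← List.drop_drop, hdrop]
      rfl
    have hcast : ((t : Int) + 1) = (((t + 1 : Nat) : Int)) := by push_cast; ring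
    rw [rowA a b t c hat, hcast]
    exact ihsuf (t + 1) hdrop' (by omega)

theorem levA_main (s1 s2 : String) (hle : s2.toList.length ≤ s1.toList.length) :
    levenshtein_distance s1 s2 = dRec s1.toList s2.toList s1.toList.length s2.toList.length := by
  rw [levenshtein_distance]
  have hswap : ¬ (PySem.Str.len s1 < PySem.Str.len s2) := by
    simp only [PySem.Str.len_eq]
    exact_mod_cast not_lt.mpr hle
  rw [if_neg hswap]
  by_cases hm : s2.toList.length = 0
  · have hz : PySem.Str.len s2 = 0 := by simp [PySem.Str.len_eq, hm]
    rw [if_pos hz, hm, dRec_zero_right]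
    simp [PySem.Str.len_eq]
  · have hz : ¬ (PySem.Str.len s2 = 0) := by
      simp only [PySem.Str.len_eq]
      exact_mod_cast hm
    rw [if_neg hz]
    have hinit : PySem.List.pyRange 0 (PySem.Str.len s2 + 1) 1
        = (List.range (s2.toList.length + 1)).map (fun j => dRec s1.toList s2.toList 0 j) := by
      rw [PySem.List.pyRange_one]
      simp only [PySem.Str.len_eq]
      rw [show (((s2.toList.length : Int)) + 1 - 0).toNat = s2.toList.length + 1 by omega]
      exact List.map_congr_left (fun k _ => by simp [dRec_zero_left])
    have hout := outerA s1.toList s2.toList s1.toList 0 rfl (by omega)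
    simp only [Nat.cast_zero] at hout
    rw [hinit, hout, List.range_succ, List.map_append, List.map_cons, List.map_nil,
      PySem.List.pyGetD_neg_one_append_singleton]

theorem levA_eq (s1 s2 : String) :
    levenshtein_distance s1 s2 = dRec s1.toList s2.toList s1.toList.length s2.toList.length := by
  by_cases h : s1.toList.length < s2.toList.length
  · rw [levenshtein_distance]
    have hswap : PySem.Str.len s1 < PySem.Str.len s2 := by
      simp only [PySem.Str.len_eq]
      exact_mod_cast h
    rw [if_pos hswap, levA_main s2 s1 (le_of_lt h)]
    exact (dRec_symm s1.toList s2.toList (s1.toList.length + s2.toList.length)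
      s1.toList.length s2.toList.length (by omega)).symm
  · exact levA_main s1 s2 (by omega)

-- ---------- B side: the anti-diagonal wavefront fills the dict with dRec values ----------

-- cells is correct on all interior cells with i + j ≤ K-1, plus those on diagonal K left of column I
def okUpto (s1 s2 : String) (K I : Int) (cells : PySem.Dict (Int × Int) Int) : Prop :=
  ∀ i j : Nat, 1 ≤ i → i ≤ s1.toList.length → 1 ≤ j → j ≤ s2.toList.length →
    ((i : Int) + (j : Int) ≤ K - 1 ∨ ((i : Int) + (j : Int) = K ∧ (i : Int) < I)) →
    cells.getD ((i : Int), (j : Int)) 0 = dRec s1.toList s2.toList i j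

-- cells is correct on all interior cells with i + j ≤ K
def cellsOK (s1 s2 : String) (K : Int) (cells : PySem.Dict (Int × Int) Int) : Prop :=
  ∀ i j : Nat, 1 ≤ i → i ≤ s1.toList.length → 1 ≤ j → j ≤ s2.toList.length →
    (i : Int) + (j : Int) ≤ K →
    cells.getD ((i : Int), (j : Int)) 0 = dRec s1.toList s2.toList i j

theorem stepInner_ok (s1 s2 : String) (K I : Int) (cells : PySem.Dict (Int × Int) Int)
    (hI0 : 1 ≤ I) (hIm : K - (s2.toList.length : Int) ≤ I)
    (hIn : I ≤ (s1.toList.length : Int)) (hIK : I ≤ K - 1)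
    (h : okUpto s1 s2 K I cells) :
    okUpto s1 s2 K (I + 1)
      (cells.insert (I, K - I)
        (min (pvCell cells (I - 1) (K - I) + 1)
          (min (pvCell cells I (K - I - 1) + 1)
            (pvCell cells (I - 1) (K - I - 1)
              + (if PySem.Str.pyGet? s1 (I - 1) = PySem.Str.pyGet? s2 (K - I - 1) then 0 else 1))))) := by
  intro i j h1 h2 h3 h4 hcase
  rw [PySem.Dict.getD_insert]
  by_cases hkey : (((i : Int)), ((j : Int))) = (I, K - I)
  · rw [if_pos hkey]
    have hi : (i : Int) = I := (Prod.mk.injEq .. ▸ hkey).1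
    have hj : (j : Int) = K - I := (Prod.mk.injEq .. ▸ hkey).2
    obtain ⟨i', rfl⟩ : ∃ i', i = i' + 1 := ⟨i - 1, by omega⟩
    obtain ⟨j', rfl⟩ : ∃ j', j = j' + 1 := ⟨j - 1, by omega⟩
    push_cast at hi hj
    rw [dRec_succ]
    have hup : pvCell cells (I - 1) (K - I) = dRec s1.toList s2.toList i' (j' + 1) := by
      unfold pvCell
      by_cases hz : I - 1 = 0
      · rw [if_pos hz]
        have hi0 : i' = 0 := by omega
        subst hi0
        rw [dRec_zero_left]
        push_cast
        omega
      · rw [if_neg hz, if_neg (by omega)]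
        rw [show (K - I) = (((j' + 1 : Nat)) : Int) by push_cast; omega,
            show (I - 1) = ((i' : Nat) : Int) by push_cast; omega]
        exact h i' (j' + 1) (by omega) (by omega) (by omega) (by omega) (Or.inl (by push_cast; omega))
    have hleft : pvCell cells I (K - I - 1) = dRec s1.toList s2.toList (i' + 1) j' := by
      unfold pvCell
      rw [if_neg (by omega)]
      by_cases hz : K - I - 1 = 0
      · rw [if_pos hz]
        have hj0 : j' = 0 := by omega
        subst hj0
        rw [dRec_zero_right]
        push_cast
        omega
      · rw [if_neg hz]
        rw [show (K - I - 1) = ((j' : Nat) : Int) by push_cast; omega,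
            show (I : Int) = (((i' + 1 : Nat)) : Int) by push_cast; omega]
        exact h (i' + 1) j' (by omega) (by omega) (by omega) (by omega) (Or.inl (by push_cast; omega))
    have hdiag : pvCell cells (I - 1) (K - I - 1) = dRec s1.toList s2.toList i' j' := by
      unfold pvCell
      by_cases hz : I - 1 = 0
      · rw [if_pos hz]
        have hi0 : i' = 0 := by omega
        subst hi0
        rw [dRec_zero_left]
        push_cast
        omega
      · rw [if_neg hz]
        by_cases hz2 : K - I - 1 = 0
        · rw [if_pos hz2]
          have hj0 : j' = 0 := by omega
          subst hj0
          rw [dRec_zero_right]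
          push_cast
          omega
        · rw [if_neg hz2]
          rw [show (K - I - 1) = ((j' : Nat) : Int) by push_cast; omega,
              show (I - 1) = ((i' : Nat) : Int) by push_cast; omega]
          exact h i' j' (by omega) (by omega) (by omega) (by omega) (Or.inl (by push_cast; omega))
    have hcost : (if PySem.Str.pyGet? s1 (I - 1) = PySem.Str.pyGet? s2 (K - I - 1) then (0 : Int) else 1)
        = (if s1.toList[i']? = s2.toList[j']? then (0 : Int) else 1) := by
      rw [show (K - I - 1) = ((j' : Nat) : Int) by push_cast; omega,
          show (I - 1) = ((i' : Nat) : Int) by push_cast; omega,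
          PySem.Str.pyGet?_natCast, PySem.Str.pyGet?_natCast]
    rw [hup, hleft, hdiag, hcost]
  · rw [if_neg hkey]
    apply h i j h1 h2 h3 h4
    rcases hcase with hle | ⟨hsum, hlt⟩
    · exact Or.inl hle
    · by_cases hiI : (i : Int) = I
      · exfalso
        exact hkey (by rw [Prod.mk.injEq]; exact ⟨hiI, by omega⟩)
      · exact Or.inr ⟨hsum, by omega⟩

theorem innerB (s1 s2 : String) (K : Int) :
    ∀ (fuel : Nat) (I : Int) (cells : PySem.Dict (Int × Int) Int),
      (min ((s1.toList.length : Int)) (K - 1) + 1 - I).toNat = fuel →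
      max 1 (K - (s2.toList.length : Int)) ≤ I →
      okUpto s1 s2 K I cells →
      okUpto s1 s2 K (min ((s1.toList.length : Int)) (K - 1) + 1)
        ((PySem.List.pyRange I (min ((s1.toList.length : Int)) (K - 1) + 1) 1).foldl
          (fun cells i =>
            cells.insert (i, K - i)
              (min (pvCell cells (i - 1) (K - i) + 1)
                (min (pvCell cells i (K - i - 1) + 1)
                  (pvCell cells (i - 1) (K - i - 1)
                    + (if PySem.Str.pyGet? s1 (i - 1) = PySem.Str.pyGet? s2 (K - i - 1) then 0 else 1)))))
          cells) := by
  intro fuel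
  induction fuel with
  | zero =>
    intro I cells hf hI h
    have hle : min ((s1.toList.length : Int)) (K - 1) + 1 ≤ I := by omega
    rw [PySem.List.pyRange_one_eq_nil hle, List.foldl_nil]
    intro i j h1 h2 h3 h4 hc
    apply h i j h1 h2 h3 h4
    rcases hc with hle' | ⟨hsum, hlt⟩
    · exact Or.inl hle'
    · exact Or.inr ⟨hsum, by omega⟩
  | succ fuel ih =>
    intro I cells hf hI h
    have hlt : I < min ((s1.toList.length : Int)) (K - 1) + 1 := by omega
    rw [PySem.List.pyRange_one_cons hlt, List.foldl_cons]
    have hmax := le_max_left (1 : Int) (K - (s2.toList.length : Int))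
    have hmax2 := le_max_right (1 : Int) (K - (s2.toList.length : Int))
    have hminn := min_le_left ((s1.toList.length : Int)) (K - 1)
    have hminK := min_le_right ((s1.toList.length : Int)) (K - 1)
    exact ih (I + 1) _ (by omega) (by omega)
      (stepInner_ok s1 s2 K I cells (by omega) (by omega) (by omega) (by omega) h)

theorem outerB (s1 s2 : String) :
    ∀ (fuel : Nat) (K : Int) (cells : PySem.Dict (Int × Int) Int),
      ((s1.toList.length : Int) + (s2.toList.length : Int) + 1 - K).toNat = fuel →
      cellsOK s1 s2 (K - 1) cells →
      cellsOK s1 s2 ((s1.toList.length : Int) + (s2.toList.length : Int))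
        ((PySem.List.pyRange K ((s1.toList.length : Int) + (s2.toList.length : Int) + 1) 1).foldl
          (fun cells k =>
            (PySem.List.pyRange (max 1 (k - (s2.toList.length : Int)))
                (min ((s1.toList.length : Int)) (k - 1) + 1) 1).foldl
              (fun cells i =>
                cells.insert (i, k - i)
                  (min (pvCell cells (i - 1) (k - i) + 1)
                    (min (pvCell cells i (k - i - 1) + 1)
                      (pvCell cells (i - 1) (k - i - 1)
                        + (if PySem.Str.pyGet? s1 (i - 1) = PySem.Str.pyGet? s2 (k - i - 1) then 0 else 1)))))
              cells)
          cells) := by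
  intro fuel
  induction fuel with
  | zero =>
    intro K cells hf h
    have hle : (s1.toList.length : Int) + (s2.toList.length : Int) + 1 ≤ K := by omega
    rw [PySem.List.pyRange_one_eq_nil hle, List.foldl_nil]
    intro i j h1 h2 h3 h4 hsum
    exact h i j h1 h2 h3 h4 (by omega)
  | succ fuel ih =>
    intro K cells hf h
    have hlt : K < (s1.toList.length : Int) + (s2.toList.length : Int) + 1 := by omega
    rw [PySem.List.pyRange_one_cons hlt, List.foldl_cons]
    have hok0 : okUpto s1 s2 K (max 1 (K - (s2.toList.length : Int))) cells := by
      intro i j h1 h2 h3 h4 hc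
      rcases hc with hle' | ⟨hsum, hltI⟩
      · exact h i j h1 h2 h3 h4 hle'
      · exfalso
        rcases max_cases (1 : Int) (K - (s2.toList.length : Int)) with ⟨he, _⟩ | ⟨he, _⟩ <;>
          rw [he] at hltI <;> omega
    have hinner := innerB s1 s2 K
      ((min ((s1.toList.length : Int)) (K - 1) + 1 - max 1 (K - (s2.toList.length : Int))).toNat)
      (max 1 (K - (s2.toList.length : Int))) cells rfl le_rfl hok0
    have hcellsK : cellsOK s1 s2 K
        ((PySem.List.pyRange (max 1 (K - (s2.toList.length : Int)))
            (min ((s1.toList.length : Int)) (K - 1) + 1) 1).foldl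
          (fun cells i =>
            cells.insert (i, K - i)
              (min (pvCell cells (i - 1) (K - i) + 1)
                (min (pvCell cells i (K - i - 1) + 1)
                  (pvCell cells (i - 1) (K - i - 1)
                    + (if PySem.Str.pyGet? s1 (i - 1) = PySem.Str.pyGet? s2 (K - i - 1) then 0 else 1)))))
          cells) := by
      intro i j h1 h2 h3 h4 hsum
      apply hinner i j h1 h2 h3 h4
      by_cases hK : (i : Int) + (j : Int) ≤ K - 1
      · exact Or.inl hK
      · refine Or.inr ⟨by omega, ?_⟩
        rcases min_cases ((s1.toList.length : Int)) (K - 1) with ⟨he, _⟩ | ⟨he, _⟩ <;>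
          rw [he] <;> omega
    have hih := ih (K + 1) _ (by omega) (by
      rw [show K + 1 - 1 = K by ring]
      exact hcellsK)
    exact hih

theorem pvLevDiag_eq (s1 s2 : String) :
    pvLevDiag s1 s2 = dRec s1.toList s2.toList s1.toList.length s2.toList.length := by
  have hbase : cellsOK s1 s2 (2 - 1) (PySem.Dict.empty) := by
    intro i j h1 h2 h3 h4 hsum
    exfalso; omega
  have h := outerB s1 s2
    (((s1.toList.length : Int) + (s2.toList.length : Int) + 1 - 2).toNat) 2
    PySem.Dict.empty rfl hbase
  simp only [pvLevDiag, PySem.Str.len_eq]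
  unfold pvCell
  by_cases hn : s1.toList.length = 0
  · rw [if_pos (by exact_mod_cast hn), hn, dRec_zero_left]
  · rw [if_neg (by exact_mod_cast hn)]
    by_cases hm : s2.toList.length = 0
    · rw [if_pos (by exact_mod_cast hm), hm, dRec_zero_right]
    · rw [if_neg (by exact_mod_cast hm)]
      exact h s1.toList.length s2.toList.length (by omega) le_rfl (by omega) le_rfl (by omega)

-- ---------- assembling the two top-level loops ----------

theorem anyEq (sn : List String) (g : String → String → Bool) :
    (PySem.List.pyRange 1 (sn.length : Int) 1).any (fun i =>
      g (PySem.List.pyGetD sn (i - 1) "") (PySem.List.pyGetD sn i "")) =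
    (sn.zip (sn.drop 1)).any (fun p => g p.1 p.2) := by
  rw [Bool.eq_iff_iff, List.any_eq_true, List.any_eq_true]
  constructor
  · rintro ⟨i, hmem, hg⟩
    rw [PySem.List.mem_pyRange_one] at hmem
    obtain ⟨k, rfl⟩ : ∃ k : Nat, i = (k : Int) + 1 := ⟨(i - 1).toNat, by omega⟩
    have hk : k + 1 < sn.length := by omega
    have hlen : k < (sn.zip (sn.drop 1)).length := by
      rw [List.length_zip, List.length_drop]
      omega
    refine ⟨(sn.zip (sn.drop 1))[k], List.getElem_mem hlen, ?_⟩
    rw [List.getElem_zip]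
    have hz2 : (sn.drop 1)[k]'(by rw [List.length_drop]; omega) = sn[k + 1]'hk := by
      rw [List.getElem_drop]
      simp only [Nat.add_comm 1 k]
    simp only [hz2]
    have e1 : PySem.List.pyGetD sn ((k : Int) + 1 - 1) "" = sn[k]'(by omega) := by
      rw [show ((k : Int) + 1 - 1) = ((k : Nat) : Int) by push_cast; ring,
        PySem.List.pyGetD_natCast, List.getD_eq_getElem]
    have e2 : PySem.List.pyGetD sn ((k : Int) + 1) "" = sn[k + 1]'hk := by
      rw [show ((k : Int) + 1) = (((k + 1 : Nat)) : Int) by push_cast; ring,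
        PySem.List.pyGetD_natCast, List.getD_eq_getElem]
    rw [e1, e2] at hg
    exact hg
  · rintro ⟨p, hmem, hg⟩
    rw [List.mem_iff_getElem] at hmem
    obtain ⟨k, hlen, rfl⟩ := hmem
    have hk : k + 1 < sn.length := by
      rw [List.length_zip, List.length_drop] at hlen
      omega
    refine ⟨(k : Int) + 1, ?_, ?_⟩
    · rw [PySem.List.mem_pyRange_one]
      omega
    · rw [List.getElem_zip] at hg
      have hz2 : (sn.drop 1)[k]'(by rw [List.length_drop]; omega) = sn[k + 1]'hk := by
        rw [List.getElem_drop]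
        simp only [Nat.add_comm 1 k]
      simp only [hz2] at hg
      have e1 : PySem.List.pyGetD sn ((k : Int) + 1 - 1) "" = sn[k]'(by omega) := by
        rw [show ((k : Int) + 1 - 1) = ((k : Nat) : Int) by push_cast; ring,
          PySem.List.pyGetD_natCast, List.getD_eq_getElem]
      have e2 : PySem.List.pyGetD sn ((k : Int) + 1) "" = sn[k + 1]'hk := by
        rw [show ((k : Int) + 1) = (((k + 1 : Nat)) : Int) by push_cast; ring,
          PySem.List.pyGetD_natCast, List.getD_eq_getElem]
      rw [e1, e2]
      exact hg

-- ===== VERDICT (by name: the statement is the Claim_ definition above) =====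
theorem detect_active_state_levenshtein_spec : Claim_equal_detect_active_state_levenshtein := by
  intro sn th _
  unfold Spec_detect_active_state_levenshtein detect_active_state_levenshtein
    detect_active_state_levenshtein_alt
  by_cases h1 : sn.length < 2
  · rw [if_pos h1, if_pos h1]
  · rw [if_neg h1, if_neg h1]
    by_cases h2 : sn.any (fun s => PySem.Str.isIn "Compacting conversation" s) = true
    · rw [if_pos h2, if_pos h2]
    · rw [if_neg h2, if_neg h2]
      simp only [levA_eq, pvLevDiag_eq]
      exact anyEq sn (fun x y =>
        decide (dRec x.toList y.toList x.toList.length y.toList.length > th))
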